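-- pv_equiv track=rewrite | github.com/Viktor-Gostyaikin/algorithms | p_I2.py | calculate
-- ===== SOURCE A (Python) =====
-- class MyQueueSized:
--     def __init__(self, max_size):
--         self.queue = [None] * max_size
--         self.max_size = max_size
--         self.head = 0
--         self.tail = 0
--         self._size = 0
--
--     def is_empty(self):
--         return self._size == 0
--
--     def push(self, item):
--         if self._size != self.max_size:
--             self.queue[self.tail] = item
--             self.tail = (self.tail + 1) % self.max_size
--             self._size += 1
--             return ''
--         else:
--             return 'error\n'
--
--     def pop(self):
--         if self.is_empty():
--             return 'None\n'
--         item = self.queue[self.head]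
--         self.queue[self.head] = None
--         self.head = (self.head + 1) % self.max_size
--         self._size -= 1
--         return item + '\n'
--
--     def peek(self):
--         '''напечатать первое число в очереди'''
--         if self.is_empty():
--             return 'None\n'
--         return self.queue[self.head] + '\n'
--
--     def size(self):
--         '''вернуть размер очереди'''
--         return str(self._size) + '\n'
--
-- def calculate(size_queue, commands):
--     '''При превышении допустимого размера очереди нужно вывести «error».
--     При вызове операций pop() или peek() для пустой очереди нужно вывести «None».'''
--     queue = MyQueueSized(max_size=size_queue)
--     result = ''
--     for command in commands:
--         if command[0] == 'push':
--             result += queue.push(command[1])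
--         elif command[0] == 'pop':
--             result += queue.pop()
--         elif command[0] == 'peek':
--             result += queue.peek()
--         elif command[0] == 'size':
--             result += queue.size()
--     return result
-- ===== SOURCE B (Python) =====
-- def calculate(size_queue, commands):
--     '''Two-stack (amortized) bounded queue: pushes go on an inbox stack and are
--     lazily reversed into an outbox stack on demand; output lines are collected
--     in a list and joined once at the end.'''
--     inbox, outbox = [], []
--     out = []
--     for command in commands:
--         op = command[0]
--         if op == 'push':
--             if len(inbox) + len(outbox) == size_queue:
--                 out.append('error\n')
--             else:
--                 inbox.append(command[1])
--         elif op == 'pop' or op == 'peek':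
--             if not outbox:
--                 while inbox:
--                     outbox.append(inbox.pop())
--             if not outbox:
--                 out.append('None\n')
--             elif op == 'pop':
--                 out.append(outbox.pop() + '\n')
--             else:
--                 out.append(outbox[-1] + '\n')
--         elif op == 'size':
--             out.append(str(len(inbox) + len(outbox)) + '\n')
--     return ''.join(out)
-- ===== Notes on version B (the rewrite author's own statement) =====
-- stated objective: alternative
-- what changed: Replaces the preallocated circular buffer (head/tail/_size modular indexing) with the classic two-stack queue: pushes go on an inbox stack that is lazily reversed into an outbox stack when a pop/peek needs it, and the output is collected in a list joined once at the end instead of repeated string concatenation.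
import Mathlib
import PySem

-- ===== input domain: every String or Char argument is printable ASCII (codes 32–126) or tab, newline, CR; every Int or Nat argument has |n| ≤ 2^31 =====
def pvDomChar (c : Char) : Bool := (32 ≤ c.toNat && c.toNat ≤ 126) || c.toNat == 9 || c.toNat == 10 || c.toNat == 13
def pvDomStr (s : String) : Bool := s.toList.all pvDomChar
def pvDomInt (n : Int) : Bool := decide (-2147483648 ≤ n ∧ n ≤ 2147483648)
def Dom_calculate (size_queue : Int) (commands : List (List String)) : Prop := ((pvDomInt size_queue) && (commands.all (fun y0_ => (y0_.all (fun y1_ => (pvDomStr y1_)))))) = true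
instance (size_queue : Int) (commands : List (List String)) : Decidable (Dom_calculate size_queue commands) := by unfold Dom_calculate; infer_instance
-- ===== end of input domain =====

-- B replaces A's preallocated circular buffer (head/tail/_size modular indexing) with the classic
-- two-stack amortized queue (inbox stack lazily reversed into an outbox stack) and joins a list of
-- output lines once at the end; objective: alternative.

-- ===== PORT A =====
-- State of MyQueueSized: preallocated buffer of Option String (None placeholders), max_size,
-- head, tail, _size, transliterated field for field.
structure MyQueueSized where
  queue : List (Option String)
  max_size : Int
  head : Int
  tail : Int
  size : Int
deriving Repr

def myQueueInit (max_size : Int) : MyQueueSized :=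
  -- [None] * max_size (a negative max_size gives the empty list, as in Python)
  { queue := List.replicate max_size.toNat none, max_size := max_size, head := 0, tail := 0, size := 0 }

def myQueuePush (q : MyQueueSized) (item : String) : MyQueueSized × String :=
  if q.size ≠ q.max_size then
    -- self.queue[self.tail] = item; Python raises IndexError when the index is out of range
    -- (only reachable for max_size < 0, excluded by Pre_); pySetD is the total form.
    ({ q with queue := PySem.List.pySetD q.queue q.tail (some item),
              tail := PySem.Int.mod (q.tail + 1) q.max_size,
              size := q.size + 1 }, "")
  else (q, "error\n")

def myQueuePop (q : MyQueueSized) : MyQueueSized × String :=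
  if q.size = 0 then (q, "None\n")
  else
    -- item = self.queue[self.head]; the cell holds a string here (Python would raise TypeError
    -- on item + '\n' if it were None, which never happens), hence the .getD "" unwrapping.
    let item := (PySem.List.pyGetD q.queue q.head none).getD ""
    ({ q with queue := PySem.List.pySetD q.queue q.head none,
              head := PySem.Int.mod (q.head + 1) q.max_size,
              size := q.size - 1 }, item ++ "\n")

def myQueuePeek (q : MyQueueSized) : String :=
  if q.size = 0 then "None\n"
  else (PySem.List.pyGetD q.queue q.head none).getD "" ++ "\n"

def myQueueSize (q : MyQueueSized) : String :=
  PySem.Int.toStr q.size ++ "\n"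

-- loop body of calculate: command[0]/command[1] via pyGetD (Python raises on a missing index;
-- excluded by Pre_, and an empty command matches no branch either way)
def calcStepA (acc : MyQueueSized × String) (command : List String) : MyQueueSized × String :=
  let c0 := PySem.List.pyGetD command 0 ""
  if c0 = "push" then
    let (q', o) := myQueuePush acc.1 (PySem.List.pyGetD command 1 "")
    (q', acc.2 ++ o)
  else if c0 = "pop" then
    let (q', o) := myQueuePop acc.1
    (q', acc.2 ++ o)
  else if c0 = "peek" then
    (acc.1, acc.2 ++ myQueuePeek acc.1)
  else if c0 = "size" then
    (acc.1, acc.2 ++ myQueueSize acc.1)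
  else acc

def calculate (size_queue : Int) (commands : List (List String)) : String :=
  (commands.foldl calcStepA (myQueueInit size_queue, "")).2

-- ===== PORT B =====
-- Python lists used purely as stacks (append/pop at the end) are represented with the list HEAD as
-- the stack top, so the 'while inbox: outbox.append(inbox.pop())' drain loop is this recursion:
def pvTransfer : List String → List String → List String × List String
  | [], ob => ([], ob)
  | x :: rest, ob => pvTransfer rest (x :: ob)

-- loop body of B's calculate: state = ((inbox, outbox), out-line list)
def calcStepB (size_queue : Int) (acc : (List String × List String) × List String)
    (command : List String) : (List String × List String) × List String :=
  let op := PySem.List.pyGetD command 0 ""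
  if op = "push" then
    if ((acc.1.1.length : Int) + (acc.1.2.length : Int)) = size_queue then
      (acc.1, acc.2 ++ ["error\n"])
    else ((PySem.List.pyGetD command 1 "" :: acc.1.1, acc.1.2), acc.2)
  else if op = "pop" ∨ op = "peek" then
    let s := if acc.1.2 = [] then pvTransfer acc.1.1 acc.1.2 else acc.1
    match s.2 with
    | [] => (s, acc.2 ++ ["None\n"])
    | x :: rest =>
      if op = "pop" then ((s.1, rest), acc.2 ++ [x ++ "\n"])
      else ((s.1, x :: rest), acc.2 ++ [x ++ "\n"])
  else if op = "size" then
    (acc.1, acc.2 ++ [PySem.Int.toStr ((acc.1.1.length : Int) + (acc.1.2.length : Int)) ++ "\n"])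
  else acc

def calculate_alt (size_queue : Int) (commands : List (List String)) : String :=
  String.join ((commands.foldl (calcStepB size_queue) (([], []), [])).2)

-- ===== PRECONDITION & SPEC =====
-- Pre_ excludes exactly the inputs on which A raises: an empty command or a 'push' without an
-- argument (IndexError on command[0]/command[1]), and a negative size_queue together with any
-- 'push' (IndexError on the empty preallocated buffer).
def Pre_calculate (size_queue : Int) (commands : List (List String)) : Prop :=
  (∀ c ∈ commands, c ≠ [] ∧ (c.head? = some "push" → 2 ≤ c.length)) ∧
  (0 ≤ size_queue ∨ ∀ c ∈ commands, c.head? ≠ some "push")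
instance (size_queue : Int) (commands : List (List String)) : Decidable (Pre_calculate size_queue commands) := by unfold Pre_calculate; infer_instance

def pvWitness_calculate : Int × List (List String) :=
  (2, [["push", "a"], ["push", "b"], ["push", "c"], ["pop"], ["peek"], ["size"]])

def Spec_calculate (size_queue : Int) (commands : List (List String)) (out : String) : Prop := out = calculate_alt size_queue commands
instance (size_queue : Int) (commands : List (List String)) (out : String) : Decidable (Spec_calculate size_queue commands out) := by unfold Spec_calculate; infer_instance

-- ===== CLAIM (what is proved, stated in full; the proofs are below) =====
def Claim_equal_calculate : Prop := ∀ (size_queue : Int) (commands : List (List String)), Dom_calculate size_queue commands → Pre_calculate size_queue commands → Spec_calculate size_queue commands (calculate size_queue commands)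

-- ===== LEMMAS AND PROOFS =====

-- Interface layer used only by the proofs: the abstract queue as a plain front-first list with a
-- string accumulator; A is related to it by a circular-buffer invariant, B by a two-stack one.
def calcStepQ (size_queue : Int) (acc : List String × String) (command : List String) : List String × String :=
  let op := PySem.List.pyGetD command 0 ""
  if op = "push" then
    if (acc.1.length : Int) = size_queue then (acc.1, acc.2 ++ "error\n")
    else (acc.1 ++ [PySem.List.pyGetD command 1 ""], acc.2)
  else if op = "pop" then
    match acc.1 with
    | [] => ([], acc.2 ++ "None\n")
    | x :: rest => (rest, acc.2 ++ (x ++ "\n"))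
  else if op = "peek" then
    (acc.1, acc.2 ++ (match acc.1 with
                      | [] => "None\n"
                      | x :: _ => x ++ "\n"))
  else if op = "size" then
    (acc.1, acc.2 ++ PySem.Int.toStr (acc.1.length : Int) ++ "\n")
  else acc

-- Coupling invariant between A's circular-buffer state and the abstract list q (m = size_queue).
def QInv (m : Int) (st : MyQueueSized) (q : List String) : Prop :=
  st.max_size = m ∧ st.size = (q.length : Int) ∧
  ((0 < m ∧ 0 ≤ st.head ∧ st.head < m ∧ 0 ≤ st.tail ∧ st.tail < m ∧
      (q.length : Int) ≤ m ∧ (st.queue.length : Int) = m ∧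
      st.tail = (st.head + q.length) % m ∧
      ∀ i : Nat, i < q.length →
        st.queue.getD ((st.head + (i : Int)) % m).toNat none = some (q.getD i ""))
   ∨ (m ≤ 0 ∧ q = []))

theorem qinv_init (m : Int) : QInv m (myQueueInit m) [] := by
  unfold QInv myQueueInit
  by_cases h : 0 < m
  · refine ⟨rfl, rfl, Or.inl ⟨h, le_refl _, h, le_refl _, h, by simp; omega, ?_, ?_, ?_⟩⟩
    · simp [Int.toNat_of_nonneg h.le]
    · simp
    · intro i hi; simp at hi
  · exact ⟨rfl, rfl, Or.inr ⟨by omega, rfl⟩⟩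

-- two buffer indices at distance strictly between 0 and m land on different cells
theorem emod_ne_of_sub (m a b : Int) (h1 : 0 < b - a) (h2 : b - a < m) : a % m ≠ b % m := by
  intro he
  have hd : m ∣ (b - a) := by
    apply Int.dvd_of_emod_eq_zero
    rw [Int.sub_emod, ← he]
    simp
  have := Int.le_of_dvd h1 hd
  omega

-- reading the buffer cell at head yields the front of the coupled list
theorem read_head (m : Int) (st : MyQueueSized) (x : String) (rest : List String)
    (hh0 : 0 ≤ st.head) (hhm : st.head < m) (hlq : ((st.queue.length : Int)) = m)
    (hcont : ∀ i : Nat, i < (x :: rest).length →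
      st.queue.getD ((st.head + (i : Int)) % m).toNat none = some ((x :: rest).getD i "")) :
    PySem.List.pyGetD st.queue st.head none = some x := by
  have hread0 := hcont 0 (by simp)
  rw [show (st.head + ((0 : Nat) : Int)) % m = st.head by
        simpa using Int.emod_eq_of_lt hh0 hhm] at hread0
  have hlt : st.head.toNat < st.queue.length := by omega
  rw [PySem.List.pyGetD_eq_getElem st.queue none hh0 (by omega)]
  rw [List.getD_eq_getElem?_getD, List.getElem?_eq_getElem hlt] at hread0
  simpa using hread0

-- one step preserves the invariant and produces the same output on both sides
theorem step_rel (m : Int) (st : MyQueueSized) (q : List String) (r : String)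
    (c : List String) (hc : PySem.List.pyGetD c 0 "" = "push" → 0 ≤ m)
    (hinv : QInv m st q) :
    ∃ st' q' o, calcStepA (st, r) c = (st', r ++ o) ∧
      calcStepQ m (q, r) c = (q', r ++ o) ∧ QInv m st' q' := by
  unfold QInv at hinv
  obtain ⟨hmax, hsize, hD⟩ := hinv
  by_cases hp : PySem.List.pyGetD c 0 "" = "push"
  · -- push
    have hm0 : 0 ≤ m := hc hp
    by_cases hfull : (q.length : Int) = m
    · -- queue full: both emit "error\n", state unchanged
      have hcond : ¬ st.size ≠ st.max_size := by rw [hmax, hsize]; simp [hfull]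
      refine ⟨st, q, "error\n", ?_, ?_, ⟨hmax, hsize, hD⟩⟩
      · simp [calcStepA, myQueuePush, hp, hcond]
      · simp [calcStepQ, hp, hfull]
    · -- room: A writes at tail and advances it, the abstract list appends
      obtain ⟨hm, hh0, hhm, ht0, htm, hqm, hlq, htail, hcont⟩ :
          0 < m ∧ 0 ≤ st.head ∧ st.head < m ∧ 0 ≤ st.tail ∧ st.tail < m ∧
            (q.length : Int) ≤ m ∧ ((st.queue.length : Int)) = m ∧
            st.tail = (st.head + q.length) % m ∧
            ∀ i : Nat, i < q.length →
              st.queue.getD ((st.head + (i : Int)) % m).toNat none = some (q.getD i "") := by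
        rcases hD with h | h
        · exact h
        · exfalso; apply hfull; rw [h.2]; simp; omega
      have hcond : st.size ≠ st.max_size := by rw [hmax, hsize]; exact hfull
      refine ⟨{ st with queue := PySem.List.pySetD st.queue st.tail (some (PySem.List.pyGetD c 1 "")),
                        tail := PySem.Int.mod (st.tail + 1) st.max_size,
                        size := st.size + 1 },
              q ++ [PySem.List.pyGetD c 1 ""], "", ?_, ?_, ?_⟩
      · simp [calcStepA, myQueuePush, hp, hcond]
      · simp [calcStepQ, hp, hfull]
      · have hmodeq : PySem.Int.mod (st.tail + 1) st.max_size = (st.tail + 1) % m := by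
          rw [hmax]; exact PySem.Int.mod_eq_emod_of_pos hm
        unfold QInv
        refine ⟨hmax, ?_, Or.inl ⟨hm, hh0, hhm, ?_, ?_, ?_, ?_, ?_, ?_⟩⟩
        · simp [hsize]
        · simp only [hmodeq]; exact Int.emod_nonneg _ (by omega)
        · simp only [hmodeq]; exact Int.emod_lt_of_pos _ hm
        · simp; omega
        · simp only [PySem.List.length_pySetD]; exact hlq
        · simp only [List.length_append, List.length_cons, List.length_nil]
          rw [hmodeq, htail, Int.emod_add_emod]
          congr 1
          push_cast
          omega
        · intro i hi
          simp only [List.length_append, List.length_cons, List.length_nil] at hi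
          have hset : PySem.List.pySetD st.queue st.tail (some (PySem.List.pyGetD c 1 "")) =
              st.queue.set st.tail.toNat (some (PySem.List.pyGetD c 1 "")) :=
            PySem.List.pySetD_of_nonneg _ _ ht0
          simp only [hset]
          by_cases hi' : i < q.length
          · have hne : ((st.head + (i : Int)) % m).toNat ≠ st.tail.toNat := by
              have h1 : (st.head + (i : Int)) % m ≠ st.tail := by
                rw [htail]
                exact emod_ne_of_sub m _ _ (by omega) (by omega)
              have h2 : 0 ≤ (st.head + (i : Int)) % m := Int.emod_nonneg _ (by omega)
              omega
            rw [List.getD_eq_getElem?_getD, List.getElem?_set_ne (Ne.symm hne),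
                ← List.getD_eq_getElem?_getD, hcont i hi']
            simp [List.getD_eq_getElem?_getD, List.getElem?_append_left hi']
          · have hieq : i = q.length := by omega
            subst hieq
            have hidx : ((st.head + ((q.length : Nat) : Int)) % m).toNat = st.tail.toNat := by
              rw [← htail]
            rw [hidx]
            have htl : st.tail.toNat < st.queue.length := by omega
            rw [List.getD_eq_getElem?_getD, List.getElem?_set_self htl]
            simp [List.getD_eq_getElem?_getD]
  · by_cases hpo : PySem.List.pyGetD c 0 "" = "pop"
    · -- pop
      by_cases hemp : st.size = 0
      · have h0 : q.length = 0 := by omega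
        have hq : q = [] := List.length_eq_zero_iff.mp h0
        subst hq
        refine ⟨st, [], "None\n", ?_, ?_, ⟨hmax, hsize, hD⟩⟩
        · simp [calcStepA, myQueuePop, hpo, hemp]
        · simp [calcStepQ, hpo]
      · cases q with
        | nil => exfalso; apply hemp; rw [hsize]; simp
        | cons x rest =>
          obtain ⟨hm, hh0, hhm, ht0, htm, hqm, hlq, htail, hcont⟩ :
              0 < m ∧ 0 ≤ st.head ∧ st.head < m ∧ 0 ≤ st.tail ∧ st.tail < m ∧
                ((x :: rest).length : Int) ≤ m ∧ ((st.queue.length : Int)) = m ∧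
                st.tail = (st.head + (x :: rest).length) % m ∧
                ∀ i : Nat, i < (x :: rest).length →
                  st.queue.getD ((st.head + (i : Int)) % m).toNat none =
                    some ((x :: rest).getD i "") := by
            rcases hD with h | h
            · exact h
            · simp at h
          have hpg : PySem.List.pyGetD st.queue st.head none = some x :=
            read_head m st x rest hh0 hhm hlq hcont
          have hmodeq : PySem.Int.mod (st.head + 1) st.max_size = (st.head + 1) % m := by
            rw [hmax]; exact PySem.Int.mod_eq_emod_of_pos hm
          refine ⟨{ st with queue := PySem.List.pySetD st.queue st.head none,
                            head := PySem.Int.mod (st.head + 1) st.max_size,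
                            size := st.size - 1 }, rest, x ++ "\n", ?_, ?_, ?_⟩
          · simp [calcStepA, myQueuePop, hpo, hemp, hpg]
          · simp [calcStepQ, hpo]
          · unfold QInv
            refine ⟨hmax, ?_, Or.inl ⟨hm, ?_, ?_, ht0, htm, ?_, ?_, ?_, ?_⟩⟩
            · simp only [List.length_cons] at hsize
              push_cast at hsize ⊢
              omega
            · simp only [hmodeq]; exact Int.emod_nonneg _ (by omega)
            · simp only [hmodeq]; exact Int.emod_lt_of_pos _ hm
            · simp only [List.length_cons] at hqm
              push_cast at hqm ⊢
              omega
            · simp only [PySem.List.length_pySetD]; exact hlq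
            · rw [htail, hmodeq, Int.emod_add_emod]
              congr 1
              simp only [List.length_cons]
              push_cast
              omega
            · intro i hi
              have hset : PySem.List.pySetD st.queue st.head none =
                  st.queue.set st.head.toNat none := PySem.List.pySetD_of_nonneg _ _ hh0
              simp only [hset, hmodeq, Int.emod_add_emod]
              rw [show st.head + 1 + (i : Int) = st.head + (((i + 1 : Nat)) : Int) by push_cast; ring]
              have hne : ((st.head + (((i + 1 : Nat)) : Int)) % m).toNat ≠ st.head.toNat := by
                have h1 : st.head % m ≠ (st.head + (((i + 1 : Nat)) : Int)) % m := by
                  apply emod_ne_of_sub m _ _ (by push_cast; omega)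
                  have : ((x :: rest).length : Int) ≤ m := hqm
                  simp only [List.length_cons] at this
                  push_cast at this ⊢
                  omega
                rw [Int.emod_eq_of_lt hh0 hhm] at h1
                have h2 : 0 ≤ (st.head + (((i + 1 : Nat)) : Int)) % m := Int.emod_nonneg _ (by omega)
                omega
              rw [List.getD_eq_getElem?_getD, List.getElem?_set_ne (Ne.symm hne),
                  ← List.getD_eq_getElem?_getD, hcont (i + 1) (by simp; omega)]
              simp
    · by_cases hpe : PySem.List.pyGetD c 0 "" = "peek"
      · -- peek
        by_cases hemp : st.size = 0
        · have h0 : q.length = 0 := by omega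
          have hq : q = [] := List.length_eq_zero_iff.mp h0
          subst hq
          refine ⟨st, [], "None\n", ?_, ?_, ⟨hmax, hsize, hD⟩⟩
          · simp [calcStepA, myQueuePeek, hpe, hemp]
          · simp [calcStepQ, hpe]
        · cases q with
          | nil => exfalso; apply hemp; rw [hsize]; simp
          | cons x rest =>
            obtain ⟨hm, hh0, hhm, ht0, htm, hqm, hlq, htail, hcont⟩ :
                0 < m ∧ 0 ≤ st.head ∧ st.head < m ∧ 0 ≤ st.tail ∧ st.tail < m ∧
                  ((x :: rest).length : Int) ≤ m ∧ ((st.queue.length : Int)) = m ∧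
                  st.tail = (st.head + (x :: rest).length) % m ∧
                  ∀ i : Nat, i < (x :: rest).length →
                    st.queue.getD ((st.head + (i : Int)) % m).toNat none =
                      some ((x :: rest).getD i "") := by
              rcases hD with h | h
              · exact h
              · simp at h
            have hpg : PySem.List.pyGetD st.queue st.head none = some x :=
              read_head m st x rest hh0 hhm hlq hcont
            refine ⟨st, x :: rest, x ++ "\n", ?_, ?_, ⟨hmax, hsize, hD⟩⟩
            · simp [calcStepA, myQueuePeek, hpe, hemp, hpg]
            · simp [calcStepQ, hpe]
      · by_cases hsz : PySem.List.pyGetD c 0 "" = "size"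
        · refine ⟨st, q, PySem.Int.toStr st.size ++ "\n", ?_, ?_, ⟨hmax, hsize, hD⟩⟩
          · simp [calcStepA, myQueueSize, hsz]
          · simp [calcStepQ, hsz, ← hsize, String.append_assoc]
        · refine ⟨st, q, "", ?_, ?_, ⟨hmax, hsize, hD⟩⟩
          · simp [calcStepA, hp, hpo, hpe, hsz]
          · simp [calcStepQ, hp, hpo, hpe, hsz]

theorem foldl_rel (m : Int) (cs : List (List String))
    (hcs : ∀ c ∈ cs, PySem.List.pyGetD c 0 "" = "push" → 0 ≤ m) :
    ∀ (st : MyQueueSized) (q : List String) (r : String), QInv m st q →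
      (cs.foldl calcStepA (st, r)).2 = (cs.foldl (calcStepQ m) (q, r)).2 := by
  induction cs with
  | nil => intro st q r _; rfl
  | cons c cs ih =>
      intro st q r hinv
      obtain ⟨st', q', o, hA, hB, hinv'⟩ :=
        step_rel m st q r c (hcs c (by simp)) hinv
      simp only [List.foldl_cons, hA, hB]
      exact ih (fun c hc => hcs c (List.mem_cons_of_mem _ hc)) st' q' (r ++ o) hinv'

-- ===== second layer: the abstract list versus B's two-stack state =====

theorem transfer_eq : ∀ (i ob : List String), pvTransfer i ob = ([], i.reverse ++ ob) := by
  intro i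
  induction i with
  | nil => intro ob; simp [pvTransfer]
  | cons x rest ih => intro ob; simp [pvTransfer, ih]

theorem join_snoc (l : List String) (s : String) :
    String.join (l ++ [s]) = String.join l ++ s := by
  simp [String.join, List.foldl_append]

-- one step: the abstract list step mirrors B's two-stack step under q = outbox ++ inbox.reverse
theorem stepBQ (m : Int) (ib ob out : List String) (c : List String) :
    calcStepQ m (ob ++ ib.reverse, String.join out) c =
      ((calcStepB m ((ib, ob), out) c).1.2 ++ (calcStepB m ((ib, ob), out) c).1.1.reverse,
       String.join ((calcStepB m ((ib, ob), out) c).2)) := by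
  by_cases hp : PySem.List.pyGetD c 0 "" = "push"
  · by_cases hfull : ((ib.length : Int) + (ob.length : Int)) = m
    · simp [calcStepQ, calcStepB, hp, hfull, join_snoc, add_comm]
    · simp [calcStepQ, calcStepB, hp, hfull, add_comm]
  · by_cases hpo : PySem.List.pyGetD c 0 "" = "pop"
    · cases hob : ob with
      | nil =>
          cases hib : ib.reverse with
          | nil => simp [calcStepQ, calcStepB, hpo, transfer_eq, hib, join_snoc]
          | cons x rest => simp [calcStepQ, calcStepB, hpo, transfer_eq, hib, join_snoc]
      | cons y obt => simp [calcStepQ, calcStepB, hpo, join_snoc]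
    · by_cases hpe : PySem.List.pyGetD c 0 "" = "peek"
      · cases hob : ob with
        | nil =>
            cases hib : ib.reverse with
            | nil => simp [calcStepQ, calcStepB, hpe, transfer_eq, hib, join_snoc]
            | cons x rest => simp [calcStepQ, calcStepB, hpe, transfer_eq, hib, join_snoc]
        | cons y obt => simp [calcStepQ, calcStepB, hpe, join_snoc]
      · by_cases hsz : PySem.List.pyGetD c 0 "" = "size"
        · simp [calcStepQ, calcStepB, hsz, join_snoc, String.append_assoc, add_comm]
        · simp [calcStepQ, calcStepB, hp, hpo, hpe, hsz]

theorem foldl_BQ (m : Int) (cs : List (List String)) :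
    ∀ (ib ob out : List String),
      (cs.foldl (calcStepQ m) (ob ++ ib.reverse, String.join out)).2 =
        String.join ((cs.foldl (calcStepB m) ((ib, ob), out)).2) := by
  induction cs with
  | nil => intro ib ob out; rfl
  | cons c cs ih =>
      intro ib ob out
      simp only [List.foldl_cons, stepBQ m ib ob out c]
      exact ih _ _ _

-- ===== VERDICT (by name: the statement is the Claim_ definition above) =====
theorem calculate_spec : Claim_equal_calculate := by
  intro m cs _ hpre
  show _ = _
  unfold calculate calculate_alt
  have hA : (cs.foldl calcStepA (myQueueInit m, "")).2 =
      (cs.foldl (calcStepQ m) ([], "")).2 := by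
    apply foldl_rel m cs _ _ [] "" (qinv_init m)
    intro c hc hpush
    rcases hpre.2 with h | h
    · exact h
    · exfalso
      obtain ⟨hne, -⟩ := hpre.1 c hc
      cases c with
      | nil => exact hne rfl
      | cons x xs =>
          apply h _ hc
          simpa [PySem.List.pyGetD] using hpush
  rw [hA]
  have := foldl_BQ m cs [] [] []
  simpa [String.join] using this
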